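-- pv_equiv track=rewrite | github.com/Carath/Advent-of-Code | 2020/AoC_2020_14.py | do_mask
-- ===== SOURCE A (Python) =====
-- def do_mask(mask, value): # careful! this is not an AND mask!
-- 	res, exponent = 0, 1
-- 	for i in range(len(mask) - 1, -1, -1): # in {n-1, ..., 0}
-- 		if mask[i] == 'X':
-- 			res += (value % 2) * exponent
-- 		else:
-- 			res += int(mask[i]) * exponent
-- 		value //= 2
-- 		exponent *= 2
-- 	return res
-- ===== SOURCE B (Python) =====
-- def do_mask(mask, value):
--     # One left-to-right pass builds the X-positions bitmask and the forced sum,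
--     # then one bitwise AND extracts all kept value bits at once.
--     xmask, setsum = 0, 0
--     for c in mask:
--         xmask = 2 * xmask + (1 if c == 'X' else 0)
--         setsum = 2 * setsum + (0 if c == 'X' else int(c))
--     return (value & xmask) + setsum
-- ===== Notes on version B (the rewrite author's own statement) =====
-- stated objective: idiomatic
-- what changed: Instead of scanning the mask right-to-left while repeatedly halving the value and accumulating bit-by-bit with an explicit exponent, B makes one left-to-right Horner pass that builds an X-position bitmask and the forced digit sum, then combines them in closed form as (value & xmask) + setsum.
import Mathlib
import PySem

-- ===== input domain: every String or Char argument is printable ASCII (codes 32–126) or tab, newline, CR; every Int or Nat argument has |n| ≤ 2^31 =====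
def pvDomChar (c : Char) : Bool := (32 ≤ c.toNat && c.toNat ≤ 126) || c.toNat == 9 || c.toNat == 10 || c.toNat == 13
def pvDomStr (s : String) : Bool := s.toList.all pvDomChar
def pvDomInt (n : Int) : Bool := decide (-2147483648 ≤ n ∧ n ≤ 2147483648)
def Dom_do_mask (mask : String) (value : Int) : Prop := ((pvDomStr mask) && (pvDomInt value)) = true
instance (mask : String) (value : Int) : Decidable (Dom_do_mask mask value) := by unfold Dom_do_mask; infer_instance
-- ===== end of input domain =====

-- B replaces A's right-to-left value-halving accumulation by one left-to-right Horner pass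
-- building an X-bitmask and a forced-digit sum, combined in closed form as (value & xmask) + setsum.


-- ===== PORT A =====
-- int(c) for a one-character string: exact via PySem.Int.ofChars?; none (ValueError) is outside Pre_, getD 0 is never read there
def digitVal (c : Char) : Int := (PySem.Int.ofChars? [c]).getD 0

-- one iteration of A's loop body; state = (res, value, exponent); the getD 'X' default is never read (i is always in range)
def stepA (cs : List Char) (s : Int × Int × Int) (i : Int) : Int × Int × Int :=
  let c := (PySem.List.pyGet? cs i).getD 'X'
  let res := if c = 'X' then s.1 + PySem.Int.mod s.2.1 2 * s.2.2
             else s.1 + digitVal c * s.2.2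
  (res, PySem.Int.floordiv s.2.1 2, s.2.2 * 2)

def do_mask (mask : String) (value : Int) : Int :=
  ((PySem.List.pyRange ((mask.toList.length : Int) - 1) (-1) (-1)).foldl
    (stepA mask.toList) (0, value, 1)).1

-- ===== PORT B =====
-- one iteration of B's loop body; state = (xmask, setsum)
def stepB (s : Int × Int) (c : Char) : Int × Int :=
  (2 * s.1 + (if c = 'X' then 1 else 0), 2 * s.2 + (if c = 'X' then 0 else digitVal c))

def do_mask_alt (mask : String) (value : Int) : Int :=
  let p := mask.toList.foldl stepB (0, 0)
  PySem.Int.band value p.1 + p.2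

-- ===== PRECONDITION & SPEC =====
-- Pre_ excludes masks containing a character other than 'X' or a decimal digit:
-- there A's int(mask[i]) raises ValueError (and B's int(c) raises too).
def Pre_do_mask (mask : String) (value : Int) : Prop :=
  mask.toList.all (fun c => c = 'X' || ('0' ≤ c && c ≤ '9')) = true
instance (mask : String) (value : Int) : Decidable (Pre_do_mask mask value) := by unfold Pre_do_mask; infer_instance

def pvWitness_do_mask : String × Int := ("X1", 2)

def Spec_do_mask (mask : String) (value : Int) (out : Int) : Prop := out = do_mask_alt mask value
instance (mask : String) (value : Int) (out : Int) : Decidable (Spec_do_mask mask value out) := by unfold Spec_do_mask; infer_instance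

-- ===== CLAIM (what is proved, stated in full; the proofs are below) =====
def Claim_equal_do_mask : Prop := ∀ (mask : String) (value : Int), Dom_do_mask mask value → Pre_do_mask mask value → Spec_do_mask mask value (do_mask mask value)

-- ===== LEMMAS AND PROOFS =====

-- reference function: the mask processed right-to-left (so: on the REVERSED char list)
def gbit (c : Char) (v : Int) : Int := if c = 'X' then PySem.Int.mod v 2 else digitVal c

def refMask : List Char → Int → Int
  | [], _ => 0
  | c :: r, v => gbit c v + 2 * refMask r (PySem.Int.floordiv v 2)

def vshift : Nat → Int → Int
  | 0, v => v
  | n + 1, v => vshift n (PySem.Int.floordiv v 2)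

-- Nat bit-recursion step for &&&
lemma nat_land_bit (a c : Nat) (b d : Bool) :
    (2 * a + b.toNat) &&& (2 * c + d.toNat) = 2 * (a &&& c) + (b && d).toNat := by
  have h := Nat.land_bit b a d c
  simpa [Nat.bit_val] using h

-- Nat form of the split, nonnegative operand
lemma land_split_nonneg (qn mn rn bn : Nat) (hr : rn ≤ 1) (hb : bn ≤ 1) :
    (2 * qn + rn) &&& (2 * mn + bn) = 2 * (qn &&& mn) + rn * bn := by
  interval_cases rn <;> interval_cases bn <;>
    first
    | simpa using nat_land_bit qn mn false false
    | simpa using nat_land_bit qn mn false true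
    | simpa using nat_land_bit qn mn true false
    | simpa using nat_land_bit qn mn true true

-- Nat form of the split, negative first operand (two's complement via w = -v-1)
lemma land_split_neg (mn wn rn bn : Nat) (hr : rn ≤ 1) (hb : bn ≤ 1) :
    (2 * mn + bn) - ((2 * mn + bn) &&& (2 * wn + (1 - rn)))
      = 2 * (mn - (mn &&& wn)) + rn * bn := by
  have hle : mn &&& wn ≤ mn := Nat.and_le_left
  interval_cases rn <;> interval_cases bn <;>
    first
    | (have h := nat_land_bit mn wn false true; simp [Bool.toNat] at h ⊢; omega)
    | (have h := nat_land_bit mn wn false false; simp [Bool.toNat] at h ⊢; omega)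
    | (have h := nat_land_bit mn wn true true; simp [Bool.toNat] at h ⊢; omega)
    | (have h := nat_land_bit mn wn true false; simp [Bool.toNat] at h ⊢; omega)

-- Python & unfolded one binary digit at a time (second operand split as 2*m + b, b ∈ {0,1})
lemma band_split (v m b : Int) (hm : 0 ≤ m) (hb : b = 0 ∨ b = 1) :
    PySem.Int.band v (2 * m + b) =
      2 * PySem.Int.band (PySem.Int.floordiv v 2) m + PySem.Int.mod v 2 * b := by
  have hqr : PySem.Int.floordiv v 2 * 2 + PySem.Int.mod v 2 = v :=
    PySem.Int.floordiv_mul_add_mod v 2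
  have hr0 : 0 ≤ PySem.Int.mod v 2 := PySem.Int.mod_nonneg v (by norm_num)
  have hr2 : PySem.Int.mod v 2 < 2 := PySem.Int.mod_lt v (by norm_num)
  set q := PySem.Int.floordiv v 2 with hq
  set r := PySem.Int.mod v 2 with hrdef
  have hb0 : 0 ≤ b := by rcases hb with h | h <;> omega
  by_cases hv : 0 ≤ v
  · have hq0 : 0 ≤ q := by omega
    have h2mb : 0 ≤ 2 * m + b := by omega
    simp only [PySem.Int.band]
    rw [if_pos hv, if_pos h2mb, if_pos hq0, if_pos hm]
    have h1 : v.toNat = 2 * q.toNat + r.toNat := by omega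
    have h2 : (2 * m + b).toNat = 2 * m.toNat + b.toNat := by omega
    rw [h1, h2, land_split_nonneg _ _ _ _ (by omega) (by omega)]
    push_cast [Int.toNat_of_nonneg hr0, Int.toNat_of_nonneg hb0]
    try ring
  · have hq0 : ¬ 0 ≤ q := by omega
    have h2mb : 0 ≤ 2 * m + b := by omega
    simp only [PySem.Int.band]
    rw [if_neg hv, if_pos h2mb, if_neg hq0, if_pos hm]
    have h2 : (2 * m + b).toNat = 2 * m.toNat + b.toNat := by omega
    have h3 : (-v - 1).toNat = 2 * (-q - 1).toNat + (1 - r.toNat) := by omega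
    have hle : m.toNat &&& (-q - 1).toNat ≤ m.toNat := Nat.and_le_left
    rw [h2, h3, land_split_neg _ _ _ _ (by omega) (by omega)]
    push_cast [Nat.cast_sub hle, Int.toNat_of_nonneg hr0, Int.toNat_of_nonneg hb0]
    try ring

-- A's countdown loop over l ++ rest, where the indices only reach l, computes refMask of l reversed
lemma Aloop (l : List Char) : ∀ (rest : List Char) (res v exp : Int),
    (PySem.List.pyRange ((l.length : Int) - 1) (-1) (-1)).foldl (stepA (l ++ rest)) (res, v, exp)
      = (res + exp * refMask l.reverse v, vshift l.length v, exp * 2 ^ l.length) := by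
  induction l using List.reverseRecOn with
  | nil =>
    intro rest res v exp
    rw [PySem.List.pyRange_neg_one_eq_nil (by norm_num)]
    simp [refMask, vshift]
  | append_singleton l' c ih =>
    intro rest res v exp
    have hlen : (((l' ++ [c]).length : Int)) - 1 = (l'.length : Int) := by
      simp
    rw [hlen, PySem.List.pyRange_neg_one_cons (by omega), List.foldl_cons]
    have hassoc : (l' ++ [c]) ++ rest = l' ++ (c :: rest) := by simp
    rw [hassoc]
    have hget : PySem.List.pyGet? (l' ++ (c :: rest)) ((l'.length : Int)) = some c :=
      PySem.List.pyGet?_append_length l' rest c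
    show (PySem.List.pyRange ((l'.length : Int) - 1) (-1) (-1)).foldl (stepA (l' ++ (c :: rest)))
        (stepA (l' ++ (c :: rest)) (res, v, exp) (l'.length : Int)) = _
    rw [ih (c :: rest)]
    simp only [stepA, hget, Option.getD_some]
    have hrev : (l' ++ [c]).reverse = c :: l'.reverse := by simp
    have hlen2 : (l' ++ [c]).length = l'.length + 1 := by simp
    rw [hrev, hlen2]
    simp only [refMask, vshift, gbit, Prod.mk.injEq, true_and]
    refine ⟨?_, by ring⟩
    split_ifs <;> ring

lemma stepB_fst_nonneg (cs : List Char) : ∀ x s : Int, 0 ≤ x → 0 ≤ (cs.foldl stepB (x, s)).1 := by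
  induction cs with
  | nil => intro x s hx; simpa
  | cons c r ih =>
    intro x s hx
    rw [List.foldl_cons]
    apply ih
    dsimp [stepB]; split_ifs <;> omega

-- B's single pass plus one & equals refMask of the reversed mask
lemma Bmain (cs : List Char) : ∀ v : Int,
    PySem.Int.band v (cs.foldl stepB (0, 0)).1 + (cs.foldl stepB (0, 0)).2
      = refMask cs.reverse v := by
  induction cs using List.reverseRecOn with
  | nil => intro v; simp [refMask]
  | append_singleton l c ih =>
    intro v
    rw [List.foldl_append, List.foldl_cons, List.foldl_nil]
    have hP : 0 ≤ (l.foldl stepB ((0 : Int), (0 : Int))).1 := stepB_fst_nonneg l 0 0 le_rfl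
    have hrev : (l ++ [c]).reverse = c :: l.reverse := by simp
    rw [hrev]
    simp only [stepB, refMask, gbit]
    split_ifs with hc
    · rw [band_split v _ 1 hP (Or.inr rfl)]
      have h := ih (PySem.Int.floordiv v 2)
      ring_nf
      ring_nf at h
      omega
    · rw [band_split v _ 0 hP (Or.inl rfl)]
      have h := ih (PySem.Int.floordiv v 2)
      ring_nf
      ring_nf at h
      omega

-- ===== VERDICT (by name: the statement is the Claim_ definition above) =====
theorem do_mask_spec : Claim_equal_do_mask := by
  intro mask value _hd _hp
  show do_mask mask value = do_mask_alt mask value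
  unfold do_mask do_mask_alt
  have hA := Aloop mask.toList [] 0 value 1
  rw [List.append_nil] at hA
  rw [hA]
  have hB := Bmain mask.toList value
  simp only []
  rw [← hB]
  ring
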